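-- pv_equiv track=rewrite | github.com/countmath1/relearning-tictactoe | models/pool.py | _first_legal_move_in_text
-- ===== SOURCE A (Python) =====
-- from typing import List, Optional, Sequence, Tuple, Union
--
-- def _first_legal_move_in_text(text: str, legal_moves: List[str]) -> Optional[str]:
--     """Earliest occurrence of any legal move substring in model output."""
--     best: Optional[str] = None
--     best_pos = len(text) + 1
--     lower = text.lower()
--     for m in legal_moves:
--         ml = m.lower()
--         pos = lower.find(ml)
--         if pos != -1 and pos < best_pos:
--             best_pos = pos
--             best = m
--     return best
-- ===== SOURCE B (Python) =====
-- from typing import List, Optional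
--
-- def _first_legal_move_in_text(text: str, legal_moves: List[str]) -> Optional[str]:
--     """Earliest occurrence of any legal move substring in model output.
--
--     Position-driven scan: walk positions left to right and return the first
--     legal move (in list order) that matches at the current position."""
--     lower = text.lower()
--     for p in range(len(lower) + 1):
--         for m in legal_moves:
--             if lower.startswith(m.lower(), p):
--                 return m
--     return None
-- ===== Notes on version B (the rewrite author's own statement) =====
-- stated objective: alternative
-- what changed: Replaces A's per-move whole-text str.find minimum-tracking fold by a position-driven scan that walks text positions left to right and returns the first move (in list order) matching at the current position, stopping at the earliest match instead of computing every move's find over the full text.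
import Mathlib
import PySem

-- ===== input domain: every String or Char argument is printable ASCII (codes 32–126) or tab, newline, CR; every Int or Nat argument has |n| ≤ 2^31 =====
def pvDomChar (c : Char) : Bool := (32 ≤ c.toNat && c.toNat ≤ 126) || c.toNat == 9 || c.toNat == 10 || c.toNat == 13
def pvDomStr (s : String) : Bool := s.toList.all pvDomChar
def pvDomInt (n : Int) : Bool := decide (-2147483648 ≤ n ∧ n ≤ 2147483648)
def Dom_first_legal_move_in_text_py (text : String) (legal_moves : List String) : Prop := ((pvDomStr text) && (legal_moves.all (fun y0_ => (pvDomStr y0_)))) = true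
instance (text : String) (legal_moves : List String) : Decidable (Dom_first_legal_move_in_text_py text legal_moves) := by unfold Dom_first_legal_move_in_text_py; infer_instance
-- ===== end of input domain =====

-- B replaces A's per-move str.find minimum scan by a position-driven scan (earliest position first,
-- list order as tie-break); alternative decomposition, same result.


-- ===== PORT A =====
def first_legal_move_in_text_py (text : String) (legal_moves : List String) : Option String :=
  let lower := PySem.Str.lower text
  (legal_moves.foldl
    (fun (st : Option String × Int) m =>
      let ml := PySem.Str.lower m
      let pos := PySem.Str.find lower ml
      if pos ≠ -1 ∧ pos < st.2 then (some m, pos) else st)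
    (none, PySem.Str.len text + 1)).1

-- ===== PORT B =====
-- outer loop of Source B: p runs over 0 … len(lower); iteration p inspects the suffix lower[p:]
-- (Python's lower.startswith(ml, p) with 0 ≤ p ≤ len is exact as "ml is a prefix of lower[p:]");
-- the inner 'for m in legal_moves: if …: return m' is the first-match scan List.find?.
def pvAltLoop (legal_moves : List String) : List Char → Option String
  | [] => legal_moves.find? (fun m => PySem.Chars.startswith [] (PySem.Chars.lower m.toList))
  | c :: rest =>
    match legal_moves.find?
        (fun m => PySem.Chars.startswith (c :: rest) (PySem.Chars.lower m.toList)) with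
    | some m => some m
    | none => pvAltLoop legal_moves rest

def first_legal_move_in_text_py_alt (text : String) (legal_moves : List String) : Option String :=
  pvAltLoop legal_moves (PySem.Chars.lower text.toList)

-- ===== PRECONDITION & SPEC =====
def Spec_first_legal_move_in_text_py (text : String) (legal_moves : List String) (out : Option String) : Prop := out = first_legal_move_in_text_py_alt text legal_moves
instance (text : String) (legal_moves : List String) (out : Option String) : Decidable (Spec_first_legal_move_in_text_py text legal_moves out) := by unfold Spec_first_legal_move_in_text_py; infer_instance

-- ===== CLAIM (what is proved, stated in full; the proofs are below) =====
def Claim_equal_first_legal_move_in_text_py : Prop := ∀ (text : String) (legal_moves : List String), Dom_first_legal_move_in_text_py text legal_moves → Spec_first_legal_move_in_text_py text legal_moves (first_legal_move_in_text_py text legal_moves)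

-- ===== LEMMAS AND PROOFS =====

-- the lowered form of a move, and its first-occurrence position in L (A's pos)
def pvPref (m : String) : List Char := PySem.Chars.lower m.toList
def pvF (L : List Char) (m : String) : Int := PySem.Chars.find L (pvPref m)
def pvStep (L : List Char) (st : Option String × Int) (m : String) : Option String × Int :=
  if pvF L m ≠ -1 ∧ pvF L m < st.2 then (some m, pvF L m) else st

theorem pv_find?_congr {α : Type} (p q : α → Bool) :
    ∀ (l : List α), (∀ a ∈ l, p a = q a) → l.find? p = l.find? q := by
  intro l
  induction l with
  | nil => intro _; rfl
  | cons a tl ih =>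
    intro h
    simp only [List.find?_cons]
    rw [h a (by simp)]
    cases q a with
    | true => rfl
    | false => exact ih (fun b hb => h b (by simp [hb]))

-- a match at position k forces A's find result to be ≥ 0 and ≤ k (find is the FIRST occurrence)
theorem pv_find_le_of_prefix_drop (L p : List Char) (k : Nat) (h : p <+: L.drop k) :
    0 ≤ PySem.Chars.find L p ∧ PySem.Chars.find L p ≤ (k : Int) := by
  have hpos : 0 ≤ PySem.Chars.find L p := by
    rw [PySem.Chars.find_nonneg_iff]
    rw [← PySem.Chars.isIn_iff_infix, ← PySem.Chars.exists_prefix_drop_iff_isIn]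
    exact ⟨k, h⟩
  refine ⟨hpos, ?_⟩
  by_contra hk
  push Not at hk
  have hk' : k < (PySem.Chars.find L p).toNat := by omega
  exact (PySem.Chars.find_spec hpos).2 k hk' h

-- full characterisation of A's fold (minimum with first-in-list tie-break)
theorem pv_foldA (L : List Char) :
    ∀ (ms : List String) (b : Option String) (bp : Int),
      (ms.foldl (pvStep L) (b, bp) = (b, bp) ∧ ∀ m ∈ ms, ¬(pvF L m ≠ -1 ∧ pvF L m < bp))
      ∨ (∃ w, ms.foldl (pvStep L) (b, bp) = (some w, pvF L w)
          ∧ w ∈ ms ∧ pvF L w ≠ -1 ∧ pvF L w < bp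
          ∧ (∀ m ∈ ms, pvF L m ≠ -1 → pvF L m < bp → pvF L w ≤ pvF L m)
          ∧ ms.find? (fun m => pvF L m == pvF L w) = some w) := by
  intro ms
  induction ms with
  | nil => intro b bp; left; simp
  | cons m tl ih =>
    intro b bp
    by_cases h : pvF L m ≠ -1 ∧ pvF L m < bp
    · have hstep : List.foldl (pvStep L) (b, bp) (m :: tl)
          = List.foldl (pvStep L) (some m, pvF L m) tl := by
        simp only [List.foldl_cons, pvStep, if_pos h]
      rcases ih (some m) (pvF L m) with ⟨heq, hall⟩ | ⟨w, heq, hmem, hne, hlt, hmin, hfind⟩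
      · right
        refine ⟨m, by rw [hstep, heq], by simp, h.1, h.2, ?_, ?_⟩
        · intro m' hm' hne' _
          rcases List.mem_cons.mp hm' with rfl | hm'
          · exact le_refl _
          · have := hall m' hm'
            omega
        · simp
      · right
        refine ⟨w, by rw [hstep, heq], List.mem_cons_of_mem _ hmem, hne, by omega, ?_, ?_⟩
        · intro m' hm' hne' hlt'
          rcases List.mem_cons.mp hm' with rfl | hm'
          · omega
          · by_cases hc : pvF L m' < pvF L m
            · exact hmin m' hm' hne' hc
            · omega
        · rw [List.find?_cons]
          have : (pvF L m == pvF L w) = false := by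
            simp only [beq_eq_false_iff_ne, ne_eq]
            omega
          rw [this]
          exact hfind
    · have hstep : List.foldl (pvStep L) (b, bp) (m :: tl)
          = List.foldl (pvStep L) (b, bp) tl := by
        simp only [List.foldl_cons, pvStep, if_neg h]
      rcases ih b bp with ⟨heq, hall⟩ | ⟨w, heq, hmem, hne, hlt, hmin, hfind⟩
      · left
        refine ⟨by rw [hstep, heq], ?_⟩
        intro m' hm'
        rcases List.mem_cons.mp hm' with rfl | hm'
        · exact h
        · exact hall m' hm'
      · right
        refine ⟨w, by rw [hstep, heq], List.mem_cons_of_mem _ hmem, hne, hlt, ?_, ?_⟩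
        · intro m' hm' hne' hlt'
          rcases List.mem_cons.mp hm' with rfl | hm'
          · exact absurd ⟨hne', hlt'⟩ h
          · exact hmin m' hm' hne' hlt'
        · rw [List.find?_cons]
          have : (pvF L m == pvF L w) = false := by
            simp only [beq_eq_false_iff_ne, ne_eq]
            have h1 := PySem.Chars.neg_one_le_find L (pvPref m)
            have h2 : -1 ≤ pvF L m := h1
            rcases not_and_or.mp h with hm1 | hm2
            · push Not at hm1; omega
            · push Not at hm2; omega
          rw [this]
          exact hfind

-- if no move occurs anywhere, B's position scan finds nothing
theorem pv_B_none (legal : List String) :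
    ∀ (s : List Char), (∀ m ∈ legal, ¬ pvPref m <:+: s) → pvAltLoop legal s = none := by
  intro s
  induction s with
  | nil =>
    intro h
    have : legal.find? (fun m => PySem.Chars.startswith [] (PySem.Chars.lower m.toList)) = none := by
      refine List.find?_eq_none.mpr (fun m hm hc => ?_)
      have hp : pvPref m <+: ([] : List Char) := (PySem.Chars.startswith_iff _ _).mp hc
      exact h m hm hp.isInfix
    simp [pvAltLoop, this]
  | cons c rest ih =>
    intro h
    have hfind : legal.find?
        (fun m => PySem.Chars.startswith (c :: rest) (PySem.Chars.lower m.toList)) = none := by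
      refine List.find?_eq_none.mpr (fun m hm hc => ?_)
      have hp : pvPref m <+: (c :: rest) := (PySem.Chars.startswith_iff _ _).mp hc
      exact h m hm hp.isInfix
    have hrest : ∀ m ∈ legal, ¬ pvPref m <:+: rest := by
      intro m hm hc
      exact h m hm (List.infix_cons hc)
    simp only [pvAltLoop, hfind]
    exact ih hrest

-- B's scan, started anywhere at or before the winning position, returns the winner
theorem pv_B_some (legal : List String) (L : List Char) (w : String) (p : Nat)
    (hfind : legal.find? (fun m => PySem.Chars.startswith (L.drop p) (PySem.Chars.lower m.toList)) = some w)
    (h1 : ∀ m ∈ legal, ∀ i < p, ¬ pvPref m <+: L.drop i)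
    (hp : p ≤ L.length) :
    ∀ j, pvAltLoop legal (L.drop (p - j)) = some w := by
  intro j
  induction j with
  | zero =>
    simp only [Nat.sub_zero]
    cases hL : L.drop p with
    | nil => rw [hL] at hfind; simp [pvAltLoop, hfind]
    | cons c rest => rw [hL] at hfind; simp [pvAltLoop, hfind]
  | succ j ihj =>
    by_cases hj : p ≤ j
    · have : p - (j + 1) = p - j := by omega
      rw [this]; exact ihj
    · have hk : p - (j + 1) < p := by omega
      have hklen : p - (j + 1) < L.length := by omega
      rw [List.drop_eq_getElem_cons hklen]
      have hnone : legal.find?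
          (fun m => PySem.Chars.startswith (L[p - (j+1)] :: L.drop (p - (j+1) + 1))
            (PySem.Chars.lower m.toList)) = none := by
        refine List.find?_eq_none.mpr (fun m hm hc => ?_)
        have hp' : pvPref m <+: (L[p - (j+1)] :: L.drop (p - (j+1) + 1)) :=
          (PySem.Chars.startswith_iff _ _).mp hc
        rw [← List.drop_eq_getElem_cons hklen] at hp'
        exact h1 m hm _ hk hp'
      simp only [pvAltLoop, hnone]
      have : p - (j + 1) + 1 = p - j := by omega
      rw [this]
      exact ihj

theorem pv_portA_eq (text : String) (legal : List String) :
    first_legal_move_in_text_py text legal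
      = (legal.foldl (pvStep (PySem.Chars.lower text.toList))
          (none, ((PySem.Chars.lower text.toList).length : Int) + 1)).1 := by
  unfold first_legal_move_in_text_py
  have hfun : (fun (st : Option String × Int) m =>
      if PySem.Str.find (PySem.Str.lower text) (PySem.Str.lower m) ≠ -1 ∧
          PySem.Str.find (PySem.Str.lower text) (PySem.Str.lower m) < st.2
        then (some m, PySem.Str.find (PySem.Str.lower text) (PySem.Str.lower m)) else st)
      = pvStep (PySem.Chars.lower text.toList) := by
    funext st m
    simp [pvStep, pvF, pvPref]
  have hlen : PySem.Str.len text = ((PySem.Chars.lower text.toList).length : Int) := by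
    simp [PySem.Chars.lower]
  simp only []
  rw [hfun, hlen]

-- ===== VERDICT (by name: the statement is the Claim_ definition above) =====
theorem first_legal_move_in_text_py_spec : Claim_equal_first_legal_move_in_text_py := by
  intro text legal _hdom
  unfold Spec_first_legal_move_in_text_py first_legal_move_in_text_py_alt
  rw [pv_portA_eq]
  set L := PySem.Chars.lower text.toList with hL
  have hfold := pv_foldA L legal none ((L.length : Int) + 1)
  by_cases hex : ∃ m ∈ legal, pvF L m ≠ -1
  · obtain ⟨m0, hm0, hne0⟩ := hex
    rcases hfold with ⟨heq, hall⟩ | ⟨w, heq, hmem, hne, _, hmin, hfindBEq⟩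
    · exfalso
      have hle := PySem.Chars.find_le_length L (pvPref m0)
      exact hall m0 hm0 ⟨hne0, by unfold pvF; omega⟩
    · have hge0 : 0 ≤ pvF L w := by
        have := PySem.Chars.neg_one_le_find L (pvPref w)
        unfold pvF at *; omega
      set p := (pvF L w).toNat with hpdef
      have hcongr : ∀ m ∈ legal, (pvF L m == pvF L w)
          = PySem.Chars.startswith (L.drop p) (PySem.Chars.lower m.toList) := by
        intro m hm
        apply Bool.eq_iff_iff.mpr
        constructor
        · intro hb
          have hmeq : pvF L m = pvF L w := by simpa using hb
          have hge : 0 ≤ pvF L m := by omega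
          have hpre := (PySem.Chars.find_spec (s := L) (sub := pvPref m) hge).1
          rw [PySem.Chars.startswith_iff]
          have : (pvF L m).toNat = p := by omega
          rw [← this]
          exact hpre
        · intro hb
          have hpre : pvPref m <+: L.drop p := (PySem.Chars.startswith_iff _ _).mp hb
          have hle := pv_find_le_of_prefix_drop L (pvPref m) p hpre
          have hlen := PySem.Chars.find_le_length L (pvPref m)
          have hmlt : pvF L m < (L.length : Int) + 1 := by unfold pvF; omega
          have hminm := hmin m hm (by unfold pvF at *; omega) hmlt
          have : pvF L m = pvF L w := by unfold pvF at *; omega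
          simp [this]
      have hfind : legal.find?
          (fun m => PySem.Chars.startswith (L.drop p) (PySem.Chars.lower m.toList)) = some w := by
        rw [← pv_find?_congr _ _ legal hcongr]
        exact hfindBEq
      have h1 : ∀ m ∈ legal, ∀ i < p, ¬ pvPref m <+: L.drop i := by
        intro m hm i hi hpre
        have hle := pv_find_le_of_prefix_drop L (pvPref m) i hpre
        have hlen := PySem.Chars.find_le_length L (pvPref m)
        have hmlt : pvF L m < (L.length : Int) + 1 := by unfold pvF; omega
        have := hmin m hm (by unfold pvF at *; omega) hmlt
        unfold pvF at *; omega
      have hp : p ≤ L.length := by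
        have := PySem.Chars.find_le_length L (pvPref w)
        unfold pvF at *; omega
      have hB := pv_B_some legal L w p hfind h1 hp p
      rw [Nat.sub_self, List.drop_zero] at hB
      rw [heq, hB]
  · push Not at hex
    rcases hfold with ⟨heq, _⟩ | ⟨w, _, hmem, hne, _⟩
    · rw [heq]
      have hB : pvAltLoop legal L = none := by
        apply pv_B_none
        intro m hm hc
        exact absurd ((PySem.Chars.find_ne_neg_one_iff L (pvPref m)).mpr hc) (by simpa using hex m hm)
      rw [hB]
    · exact absurd hne (by simpa using hex w hmem)
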